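-- pv_equiv track=rewrite | github.com/KmolYuan/apimd | apimd/parser.py | interpret_mode
-- ===== SOURCE A (Python) =====
-- from typing import cast, Sequence, Iterable, Iterator, Union, Optional
--
-- def interpret_mode(doc: str) -> Iterator[str]:
--     r"""Replace doctest as markdown Python code.
--
--     Usage:
--     >>> from apimd.parser import interpret_mode
--     >>> '\n'.join(interpret_mode(">>> a = \"Hello\""))
--     """
--     keep = False
--     lines = doc.split('\n')
--     for i, line in enumerate(lines):
--         signed = line.startswith(">>> ")
--         if signed:
--             line = line[len(">>> "):]
--             if not keep:
--                 yield "```python"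
--                 keep = True
--         elif keep:
--             yield "```"
--             keep = False
--         yield line
--         if signed and i == len(lines) - 1:
--             yield "```"
--             keep = False
-- ===== SOURCE B (Python) =====
-- def interpret_mode(doc):
--     """Replace doctest as markdown Python code.
--
--     Run-grouping rewrite: consume each maximal run of doctest-signed lines at once,
--     emitting the fence pair around it, instead of threading a keep flag.
--     """
--     lines = doc.split('\n')
--     n = len(lines)
--     i = 0
--     while i < n:
--         line = lines[i]
--         if line.startswith(">>> "):
--             yield "```python"
--             yield line[4:]
--             i += 1
--             while i < n and lines[i].startswith(">>> "):
--                 yield lines[i][4:]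
--                 i += 1
--             yield "```"
--         else:
--             yield line
--             i += 1
-- ===== Notes on version B (the rewrite author's own statement) =====
-- stated objective: alternative
-- what changed: Replaces A's threaded keep-flag state machine (with its end-of-input special case) by run-grouping: each maximal run of doctest-signed lines is consumed by an inner loop and fenced as a unit.
import Mathlib
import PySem

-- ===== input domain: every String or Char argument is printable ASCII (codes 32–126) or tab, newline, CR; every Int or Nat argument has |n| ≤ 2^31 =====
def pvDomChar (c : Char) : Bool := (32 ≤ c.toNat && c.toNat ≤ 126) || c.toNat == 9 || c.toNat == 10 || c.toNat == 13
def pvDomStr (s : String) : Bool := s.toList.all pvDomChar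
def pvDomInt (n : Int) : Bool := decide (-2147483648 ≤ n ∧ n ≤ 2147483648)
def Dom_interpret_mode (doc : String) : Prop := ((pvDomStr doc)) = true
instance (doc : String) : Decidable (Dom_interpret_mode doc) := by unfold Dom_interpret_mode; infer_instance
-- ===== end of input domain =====

-- B changes the decomposition only (run-grouping instead of a keep flag); same O(n) cost.

-- ===== PORT A =====
-- A: state machine over enumerated lines threading the flag `keep`;
-- `rest = []` plays the role of `i == len(lines) - 1`.
def interpretGoA (keep : Bool) : List String → List String
  | [] => []
  | line :: rest =>
    if PySem.Str.startswith line ">>> " then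
      let line' := PySem.Str.slice line (some 4) none
      (if !keep then ["```python"] else []) ++ [line'] ++
        (if rest = [] then ["```"] else []) ++ interpretGoA true rest
    else
      (if keep then ["```"] else []) ++ [line] ++ interpretGoA false rest

def interpret_mode (doc : String) : List String :=
  interpretGoA false ((PySem.Str.split? doc "\n").getD [])

-- ===== PORT B =====
-- B: the inner `while` loop — strips a maximal signed run, returns (stripped lines, rest).
def interpretRunB : List String → List String × List String
  | [] => ([], [])
  | line :: rest =>
    if PySem.Str.startswith line ">>> " then
      let p := interpretRunB rest
      (PySem.Str.slice line (some 4) none :: p.1, p.2)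
    else ([], line :: rest)

theorem interpretRunB_snd_length_le (xs : List String) :
    (interpretRunB xs).2.length ≤ xs.length := by
  induction xs with
  | nil => simp [interpretRunB]
  | cons l rest ih =>
    simp only [interpretRunB]
    split
    · exact Nat.le_succ_of_le ih
    · simp

-- B: the outer loop — emit a fenced run or a plain line, then continue.
def interpretGoB : List String → List String
  | [] => []
  | line :: rest =>
    if PySem.Str.startswith line ">>> " then
      let p := interpretRunB rest
      "```python" :: PySem.Str.slice line (some 4) none :: p.1 ++ ["```"] ++ interpretGoB p.2
    else line :: interpretGoB rest
termination_by xs => xs.length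
decreasing_by
  · exact Nat.lt_succ_of_le (interpretRunB_snd_length_le rest)
  · simp

def interpret_mode_alt (doc : String) : List String :=
  interpretGoB ((PySem.Str.split? doc "\n").getD [])

-- ===== PRECONDITION & SPEC =====
def Spec_interpret_mode (doc : String) (out : List String) : Prop := out = interpret_mode_alt doc
instance (doc : String) (out : List String) : Decidable (Spec_interpret_mode doc out) := by unfold Spec_interpret_mode; infer_instance

-- ===== CLAIM (what is proved, stated in full; the proofs are below) =====
def Claim_equal_interpret_mode : Prop := ∀ (doc : String), Dom_interpret_mode doc → Spec_interpret_mode doc (interpret_mode doc)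

-- ===== LEMMAS AND PROOFS =====

-- Joint invariant: with keep = false A's loop equals B's outer loop; with
-- keep = true A's loop finishes the current run (B's inner loop), closes the
-- fence unless input is exhausted (A closed it at the last signed line), and
-- continues as B's outer loop.
theorem interpretGo_agree (xs : List String) :
    interpretGoA false xs = interpretGoB xs ∧
    interpretGoA true xs =
      (interpretRunB xs).1 ++
        (if xs = [] then [] else "```" :: interpretGoB (interpretRunB xs).2) := by
  induction xs with
  | nil => simp [interpretGoA, interpretGoB, interpretRunB]
  | cons line rest ih =>
    by_cases hs : PySem.Chars.startswith line.toList ['>', '>', '>', ' '] = true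
    · rcases eq_or_ne rest [] with hr | hr
      · subst hr
        simp [interpretGoA, interpretGoB, interpretRunB, hs]
      · constructor
        · rw [interpretGoA, interpretGoB]
          simp [hs, ih.2, hr]
        · rw [interpretGoA]
          simp [hs, interpretRunB, ih.2, hr]
    · rw [Bool.not_eq_true] at hs
      constructor
      · rw [interpretGoA, interpretGoB]
        simp [hs, ih.1]
      · rw [interpretGoA]
        conv_rhs => rw [interpretGoB.eq_def]
        simp [hs, interpretRunB, ih.1]

-- ===== VERDICT (by name: the statement is the Claim_ definition above) =====
theorem interpret_mode_spec : Claim_equal_interpret_mode := by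
  intro doc _
  unfold Spec_interpret_mode interpret_mode interpret_mode_alt
  exact (interpretGo_agree _).1
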